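-- pv_equiv track=rewrite | github.com/HengningZhang/15-puzzle-and-futoshiki-solver | Project2/main.py | generateDomains
-- ===== SOURCE A (Python) =====
-- def generateDomains(board):
--     domains=[[] for i in range(5)]
--     for i in range(5):
--         for j in range(5):
--             if board[i][j]==0:
--                 domain=[1,2,3,4,5]
--                 for k in range(5):
--                     if board[i][k] in domain:
--                         domain.remove(board[i][k])
--                     if board[k][j] in domain:
--                         domain.remove(board[k][j])
--                 domains[i].append(domain)
--             else:
--                 domains[i].append([board[i][j]])
--     return domains
-- ===== SOURCE B (Python) =====
-- def generateDomains(board):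
--     # Bitmask algorithm: one pass records each row's and column's values 1..5 as
--     # bits of a 6-bit mask; every empty cell's domain is then a lookup into a
--     # 64-entry decode table built once, indexed by row_mask | col_mask.
--     table = [[v for v in (1, 2, 3, 4, 5) if not (m >> v) & 1] for m in range(64)]
--     row_mask = [0] * 5
--     col_mask = [0] * 5
--     for i in range(5):
--         for j in range(5):
--             v = board[i][j]
--             if 1 <= v <= 5:
--                 row_mask[i] |= 1 << v
--                 col_mask[j] |= 1 << v
--     return [[[board[i][j]] if board[i][j] != 0 else table[row_mask[i] | col_mask[j]]
--              for j in range(5)] for i in range(5)]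
-- ===== Notes on version B (the rewrite author's own statement) =====
-- stated objective: alternative
-- what changed: Replaces A's per-cell loop of conditional list.remove calls with a bitmask data structure: one pass encodes each row's and column's values 1..5 as bits of a 6-bit mask, and each empty cell's domain is a single lookup in a 64-entry decode table indexed by row_mask | col_mask.
import Mathlib
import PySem

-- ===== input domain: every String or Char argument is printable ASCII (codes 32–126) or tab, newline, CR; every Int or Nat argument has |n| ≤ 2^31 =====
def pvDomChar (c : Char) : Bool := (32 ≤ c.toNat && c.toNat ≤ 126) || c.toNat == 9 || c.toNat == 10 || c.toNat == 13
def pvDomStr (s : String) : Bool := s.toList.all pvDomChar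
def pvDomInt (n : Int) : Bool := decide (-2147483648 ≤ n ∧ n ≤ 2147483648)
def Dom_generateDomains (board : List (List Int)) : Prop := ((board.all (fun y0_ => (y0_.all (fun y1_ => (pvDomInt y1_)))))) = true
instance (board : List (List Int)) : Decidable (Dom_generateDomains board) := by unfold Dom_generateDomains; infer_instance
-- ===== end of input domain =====

-- B replaces A's per-cell conditional-remove loop by a different data structure:
-- one pass records each row's/column's values 1..5 as bits of a 6-bit mask, and every
-- empty cell's domain is a lookup into a 64-entry decode table indexed by row|col mask.

-- ===== PORT A =====
-- board[i][j] (in range under Pre_)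
def pvAt (board : List (List Int)) (i j : Int) : Int :=
  PySem.List.pyGetD (PySem.List.pyGetD board i []) j 0

-- 'if x in domain: domain.remove(x)'
def pvCondRemove (domain : List Int) (x : Int) : List Int :=
  if domain.contains x then (PySem.List.remove? domain x).getD domain else domain

-- the value appended to domains[i] for the cell (i, j): A's if/else with the k-removal loop
def pvCellA (board : List (List Int)) (i j : Int) : List Int :=
  if pvAt board i j == 0 then
    (PySem.List.pyRange 0 5 1).foldl (fun domain k =>
      let domain := pvCondRemove domain (pvAt board i k)
      pvCondRemove domain (pvAt board k j)) [1, 2, 3, 4, 5]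
  else [pvAt board i j]

def generateDomains (board : List (List Int)) : List (List (List Int)) :=
  let domains : List (List (List Int)) := (PySem.List.pyRange 0 5 1).map (fun _ => [])
  (PySem.List.pyRange 0 5 1).foldl (fun domains i =>
    (PySem.List.pyRange 0 5 1).foldl (fun domains j =>
      PySem.List.pySetD domains i (PySem.List.pyGetD domains i [] ++ [pvCellA board i j]))
      domains) domains

-- ===== PORT B =====
-- Python's '(m >> v) & 1' — exact here: it is only applied to nonnegative m and v
def pvShrAnd1 (m v : Int) : Nat := (m.toNat >>> v.toNat) &&& 1

-- the 64-entry decode table: table[m] = [v for v in (1..5) if not (m >> v) & 1]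
def pvTable : List (List Int) :=
  (PySem.List.pyRange 0 64 1).map (fun m =>
    ([1, 2, 3, 4, 5] : List Int).filter (fun v => pvShrAnd1 m v == 0))

-- loop body: 'if 1 <= v <= 5: row_mask[i] |= 1 << v; col_mask[j] |= 1 << v'
-- (masks are Python ints that stay nonnegative; Nat is exact for them; the shift
--  amount v is guarded into 1..5, so v.toNat is exact)
def pvMaskStep (v i j : Int) (ms : List Nat × List Nat) : List Nat × List Nat :=
  if 1 ≤ v ∧ v ≤ 5 then
    (PySem.List.pySetD ms.1 i (PySem.List.pyGetD ms.1 i 0 ||| (1 <<< v.toNat)),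
     PySem.List.pySetD ms.2 j (PySem.List.pyGetD ms.2 j 0 ||| (1 <<< v.toNat)))
  else ms

def generateDomains_alt (board : List (List Int)) : List (List (List Int)) :=
  let ms : List Nat × List Nat :=
    (PySem.List.pyRange 0 5 1).foldl (fun ms i =>
      (PySem.List.pyRange 0 5 1).foldl (fun ms j =>
        pvMaskStep (pvAt board i j) i j ms) ms)
      ([0, 0, 0, 0, 0], [0, 0, 0, 0, 0])
  (PySem.List.pyRange 0 5 1).map (fun i =>
    (PySem.List.pyRange 0 5 1).map (fun j =>
      if pvAt board i j != 0 then [pvAt board i j]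
      else PySem.List.pyGetD pvTable
        (((PySem.List.pyGetD ms.1 i 0 ||| PySem.List.pyGetD ms.2 j 0 : Nat) : Int)) []))

-- ===== PRECONDITION & SPEC =====
-- A indexes board[i][k] for i,k < 5; it raises IndexError on fewer than 5 rows
-- or a short row among the first 5 — exactly those inputs are excluded.
def Pre_generateDomains (board : List (List Int)) : Prop :=
  5 ≤ board.length ∧ ∀ r ∈ board.take 5, 5 ≤ r.length
instance (board : List (List Int)) : Decidable (Pre_generateDomains board) := by
  unfold Pre_generateDomains; infer_instance

def pvWitness_generateDomains : List (List Int) :=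
  [[0, 1, 0, 0, 0], [0, 0, 0, 3, 0], [2, 0, 0, 0, 0], [0, 0, 4, 0, 0], [0, 0, 0, 0, 5]]

def Spec_generateDomains (board : List (List Int)) (out : List (List (List Int))) : Prop := out = generateDomains_alt board
instance (board : List (List Int)) (out : List (List (List Int))) : Decidable (Spec_generateDomains board out) := by unfold Spec_generateDomains; infer_instance

-- ===== CLAIM (what is proved, stated in full; the proofs are below) =====
def Claim_equal_generateDomains : Prop := ∀ (board : List (List Int)), Dom_generateDomains board → Pre_generateDomains board → Spec_generateDomains board (generateDomains board)

-- ===== LEMMAS AND PROOFS =====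

lemma pyRangeLit : PySem.List.pyRange 0 5 1
    = [((0:Nat):Int), ((1:Nat):Int), ((2:Nat):Int), ((3:Nat):Int), ((4:Nat):Int)] := by decide

lemma gd0 {a : Type} (d x0 x1 x2 x3 x4 : a) : List.getD [x0,x1,x2,x3,x4] 0 d = x0 := rfl
lemma gd1 {a : Type} (d x0 x1 x2 x3 x4 : a) : List.getD [x0,x1,x2,x3,x4] 1 d = x1 := rfl
lemma gd2 {a : Type} (d x0 x1 x2 x3 x4 : a) : List.getD [x0,x1,x2,x3,x4] 2 d = x2 := rfl
lemma gd3 {a : Type} (d x0 x1 x2 x3 x4 : a) : List.getD [x0,x1,x2,x3,x4] 3 d = x3 := rfl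
lemma gd4 {a : Type} (d x0 x1 x2 x3 x4 : a) : List.getD [x0,x1,x2,x3,x4] 4 d = x4 := rfl
lemma st0 {a : Type} (v x0 x1 x2 x3 x4 : a) : List.set [x0,x1,x2,x3,x4] 0 v = [v,x1,x2,x3,x4] := rfl
lemma st1 {a : Type} (v x0 x1 x2 x3 x4 : a) : List.set [x0,x1,x2,x3,x4] 1 v = [x0,v,x2,x3,x4] := rfl
lemma st2 {a : Type} (v x0 x1 x2 x3 x4 : a) : List.set [x0,x1,x2,x3,x4] 2 v = [x0,x1,v,x3,x4] := rfl
lemma st3 {a : Type} (v x0 x1 x2 x3 x4 : a) : List.set [x0,x1,x2,x3,x4] 3 v = [x0,x1,x2,v,x4] := rfl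
lemma st4 {a : Type} (v x0 x1 x2 x3 x4 : a) : List.set [x0,x1,x2,x3,x4] 4 v = [x0,x1,x2,x3,v] := rfl

-- ---- A-side: the conditional-remove loop is a membership filter ----

lemma foldl_unroll (f g : Int → Int) :
    List.foldl (fun d k => let d2 := pvCondRemove d (f k); pvCondRemove d2 (g k))
      ([1, 2, 3, 4, 5] : List Int)
      [((0:Nat):Int), ((1:Nat):Int), ((2:Nat):Int), ((3:Nat):Int), ((4:Nat):Int)]
    = List.foldl pvCondRemove ([1, 2, 3, 4, 5] : List Int)
      [f ((0:Nat):Int), g ((0:Nat):Int), f ((1:Nat):Int), g ((1:Nat):Int),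
       f ((2:Nat):Int), g ((2:Nat):Int), f ((3:Nat):Int), g ((3:Nat):Int),
       f ((4:Nat):Int), g ((4:Nat):Int)] := by
  simp only [List.foldl_cons, List.foldl_nil]

lemma cellA_foldl (board : List (List Int)) (i j : Int) :
    pvCellA board i j =
      (if pvAt board i j == 0 then
        List.foldl pvCondRemove ([1, 2, 3, 4, 5] : List Int)
          [pvAt board i ((0:Nat):Int), pvAt board ((0:Nat):Int) j,
           pvAt board i ((1:Nat):Int), pvAt board ((1:Nat):Int) j,
           pvAt board i ((2:Nat):Int), pvAt board ((2:Nat):Int) j,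
           pvAt board i ((3:Nat):Int), pvAt board ((3:Nat):Int) j,
           pvAt board i ((4:Nat):Int), pvAt board ((4:Nat):Int) j]
      else [pvAt board i j]) := by
  unfold pvCellA
  rw [pyRangeLit, foldl_unroll (fun k => pvAt board i k) (fun k => pvAt board k j)]

lemma condRemove_nodup (L : List Int) (x : Int) (h : L.Nodup) :
    pvCondRemove L x = L.filter (fun v => v != x) := by
  unfold pvCondRemove
  by_cases hx : x ∈ L
  · rw [if_pos (by simpa using hx), PySem.List.remove?_eq_some_erase L x hx,
      Option.getD_some, h.erase_eq_filter]
  · rw [if_neg (by simpa using hx)]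
    exact (List.filter_eq_self.2 (fun v hv => by
      simp only [bne_iff_ne, ne_eq]
      rintro rfl; exact hx hv)).symm

lemma fold_condRemove (xs L : List Int) (h : L.Nodup) :
    xs.foldl pvCondRemove L = L.filter (fun v => !xs.contains v) := by
  induction xs generalizing L with
  | nil => simp
  | cons x xs ih =>
    rw [List.foldl_cons, condRemove_nodup L x h, ih _ (h.filter _), List.filter_filter]
    apply List.filter_congr
    intro v _
    by_cases hvx : v = x <;> simp [hvx]

-- ---- B-side: masks and the decode table ----

-- the mask update for a single list entry, and the pure one-value mask update
def pvSAdd (l : List Nat) (k v : Int) : List Nat :=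
  if 1 ≤ v ∧ v ≤ 5 then PySem.List.pySetD l k (PySem.List.pyGetD l k 0 ||| (1 <<< v.toNat)) else l

def pvMAdd (m : Nat) (v : Int) : Nat :=
  if 1 ≤ v ∧ v ≤ 5 then m ||| (1 <<< v.toNat) else m

lemma maskStep_split (v i j : Int) (ms : List Nat × List Nat) :
    pvMaskStep v i j ms = (pvSAdd ms.1 i v, pvSAdd ms.2 j v) := by
  unfold pvMaskStep pvSAdd; split_ifs <;> rfl

lemma sadd0 (x0 x1 x2 x3 x4 : Nat) (v : Int) :
    pvSAdd [x0,x1,x2,x3,x4] ((0:Nat):Int) v = [pvMAdd x0 v, x1, x2, x3, x4] := by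
  unfold pvSAdd pvMAdd; split_ifs <;>
    simp only [PySem.List.pySetD_natCast, PySem.List.pyGetD_natCast, gd0, st0]
lemma sadd1 (x0 x1 x2 x3 x4 : Nat) (v : Int) :
    pvSAdd [x0,x1,x2,x3,x4] ((1:Nat):Int) v = [x0, pvMAdd x1 v, x2, x3, x4] := by
  unfold pvSAdd pvMAdd; split_ifs <;>
    simp only [PySem.List.pySetD_natCast, PySem.List.pyGetD_natCast, gd1, st1]
lemma sadd2 (x0 x1 x2 x3 x4 : Nat) (v : Int) :
    pvSAdd [x0,x1,x2,x3,x4] ((2:Nat):Int) v = [x0, x1, pvMAdd x2 v, x3, x4] := by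
  unfold pvSAdd pvMAdd; split_ifs <;>
    simp only [PySem.List.pySetD_natCast, PySem.List.pyGetD_natCast, gd2, st2]
lemma sadd3 (x0 x1 x2 x3 x4 : Nat) (v : Int) :
    pvSAdd [x0,x1,x2,x3,x4] ((3:Nat):Int) v = [x0, x1, x2, pvMAdd x3 v, x4] := by
  unfold pvSAdd pvMAdd; split_ifs <;>
    simp only [PySem.List.pySetD_natCast, PySem.List.pyGetD_natCast, gd3, st3]
lemma sadd4 (x0 x1 x2 x3 x4 : Nat) (v : Int) :
    pvSAdd [x0,x1,x2,x3,x4] ((4:Nat):Int) v = [x0, x1, x2, x3, pvMAdd x4 v] := by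
  unfold pvSAdd pvMAdd; split_ifs <;>
    simp only [PySem.List.pySetD_natCast, PySem.List.pyGetD_natCast, gd4, st4]

-- the mask built from the five values of a row / column
def pvMk5 (a b c d e : Int) : Nat :=
  pvMAdd (pvMAdd (pvMAdd (pvMAdd (pvMAdd 0 a) b) c) d) e

lemma mAdd_testBit (m : Nat) (v : Int) (x : Nat) (hx1 : 1 ≤ x) (hx5 : x ≤ 5) :
    (pvMAdd m v).testBit x = (m.testBit x || decide ((x:Int) = v)) := by
  unfold pvMAdd; split_ifs with h
  · rw [Nat.testBit_or]
    congr 1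
    rw [Nat.shiftLeft_eq, one_mul, Nat.testBit_two_pow]
    simp only [decide_eq_decide]
    omega
  · have hne : (x:Int) ≠ v := by omega
    simp [hne]

lemma mk5_testBit (a b c d e : Int) (x : Nat) (hx1 : 1 ≤ x) (hx5 : x ≤ 5) :
    (pvMk5 a b c d e).testBit x
      = (decide ((x:Int) = a) || decide ((x:Int) = b) || decide ((x:Int) = c)
          || decide ((x:Int) = d) || decide ((x:Int) = e)) := by
  unfold pvMk5
  rw [mAdd_testBit _ _ _ hx1 hx5, mAdd_testBit _ _ _ hx1 hx5, mAdd_testBit _ _ _ hx1 hx5,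
    mAdd_testBit _ _ _ hx1 hx5, mAdd_testBit _ _ _ hx1 hx5, Nat.zero_testBit]
  simp [Bool.or_assoc]

lemma mAdd_lt (m : Nat) (v : Int) (h : m < 64) : pvMAdd m v < 64 := by
  unfold pvMAdd; split_ifs with hg
  · have h2 : (1 <<< v.toNat) < 64 := by
      rw [Nat.shiftLeft_eq, one_mul]
      calc (2:Nat) ^ v.toNat ≤ 2 ^ 5 := Nat.pow_le_pow_right (by norm_num) (by omega)
        _ < 64 := by norm_num
    exact Nat.or_lt_two_pow (n := 6) h h2
  · exact h

lemma mk5_lt (a b c d e : Int) : pvMk5 a b c d e < 64 :=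
  mAdd_lt _ _ (mAdd_lt _ _ (mAdd_lt _ _ (mAdd_lt _ _ (mAdd_lt _ _ (by norm_num)))))

lemma shr1_testBit (m k : Nat) : (((m >>> k) &&& 1) == 0) = !(m.testBit k) := by
  simp only [Nat.testBit, Nat.and_comm]
  rcases Nat.mod_two_eq_zero_or_one (m >>> k) with h | h <;> simp [Nat.and_one_is_mod, h]

lemma table_lookup (m : Nat) (hm : m < 64) :
    PySem.List.pyGetD pvTable ((m:Nat):Int) []
      = ([1, 2, 3, 4, 5] : List Int).filter (fun v => !(m.testBit v.toNat)) := by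
  unfold pvTable
  rw [show (64 : Int) = ((64 : Nat) : Int) from rfl,
    PySem.List.pyGetD_map_pyRange _ 64 m [] hm]
  apply List.filter_congr
  intro v hv
  unfold pvShrAnd1
  rw [Int.toNat_natCast]
  exact shr1_testBit m v.toNat

set_option maxHeartbeats 1000000 in
lemma cell_eq (v r0 r1 r2 r3 r4 c0 c1 c2 c3 c4 : Int) :
    (if v == 0 then
      List.foldl pvCondRemove ([1, 2, 3, 4, 5] : List Int)
        [r0, c0, r1, c1, r2, c2, r3, c3, r4, c4]
     else [v])
    = (if v != 0 then [v]
       else pvTable.getD (pvMk5 r0 r1 r2 r3 r4 ||| pvMk5 c0 c1 c2 c3 c4) []) := by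
  by_cases hv : v = 0
  · rw [fold_condRemove _ _ (by decide)]
    have hlt : pvMk5 r0 r1 r2 r3 r4 ||| pvMk5 c0 c1 c2 c3 c4 < 64 :=
      Nat.or_lt_two_pow (n := 6) (mk5_lt _ _ _ _ _) (mk5_lt _ _ _ _ _)
    rw [← PySem.List.pyGetD_natCast pvTable _ ([] : List Int), table_lookup _ hlt]
    simp only [hv]
    norm_num
    apply List.filter_congr
    intro x hx
    have hx' : x = 1 ∨ x = 2 ∨ x = 3 ∨ x = 4 ∨ x = 5 := by
      simp at hx; tauto
    have h1 : 1 ≤ x.toNat := by omega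
    have h5 : x.toNat ≤ 5 := by omega
    have hcast : ((x.toNat : Nat) : Int) = x := by omega
    rw [mk5_testBit _ _ _ _ _ _ h1 h5, mk5_testBit _ _ _ _ _ _ h1 h5, hcast]
    apply Bool.eq_iff_iff.2
    simp only [Bool.and_eq_true, Bool.or_eq_false_iff, Bool.not_eq_true',
      decide_eq_false_iff_not]
    tauto
  · simp [hv]

-- ===== VERDICT (by name: the statement is the Claim_ definition above) =====
set_option maxHeartbeats 2000000 in
theorem generateDomains_spec : Claim_equal_generateDomains := by
  intro board _ _
  unfold Spec_generateDomains generateDomains generateDomains_alt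
  simp only [pyRangeLit, List.map_cons, List.map_nil, List.foldl_cons, List.foldl_nil,
    maskStep_split, sadd0, sadd1, sadd2, sadd3, sadd4,
    PySem.List.pySetD_natCast, PySem.List.pyGetD_natCast,
    gd0, gd1, gd2, gd3, gd4, st0, st1, st2, st3, st4,
    List.nil_append, List.cons_append]
  simp only [cellA_foldl]
  simp only [List.cons.injEq, and_true]
  repeat' apply And.intro
  all_goals exact cell_eq _ _ _ _ _ _ _ _ _ _ _
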